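-- pv_equiv track=rewrite | github.com/UmakantKulkarni/myCodes | TELECOM/Cell-Search-and-Synchronization-in-Long-Term-Evolution-Systems-master/functions/sss_detection_functions.py | detect_m_pattern_offset
-- ===== SOURCE A (Python) =====
-- def detect_m_pattern_offset(sequence, pattern):
--     pattern_length = len(pattern)
--     seq = sequence[:] + sequence[:pattern_length]
--     value = 0
--     while(len(seq) >= pattern_length):
--         if pattern == seq[:len(pattern)]:
--             if (value == 0): return value
--             return (31 - value)
--         value = value + 1
--         seq.pop(0)
--     return -1
-- ===== SOURCE B (Python) =====
-- def detect_m_pattern_offset(sequence, pattern):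
--     m = len(pattern)
--     if m == 0:
--         return 0
--     text = sequence + sequence[:m]
--     n = len(text)
--     if m > n:
--         return -1
--     ph = sum(pattern)
--     th = sum(text[:m])
--     for i in range(n - m + 1):
--         if th == ph and text[i:i + m] == pattern:
--             return i if i == 0 else 31 - i
--         if i < n - m:
--             th += text[i + m] - text[i]
--     return -1
-- ===== Notes on version B (the rewrite author's own statement) =====
-- stated objective: faster
-- what changed: Replaces A's repeated pop(0)-and-slice-compare scan with a single-pass rolling-window-sum (Rabin-Karp style) filter: the full O(m) window comparison runs only at offsets whose window sum equals the pattern sum.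
import Mathlib
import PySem

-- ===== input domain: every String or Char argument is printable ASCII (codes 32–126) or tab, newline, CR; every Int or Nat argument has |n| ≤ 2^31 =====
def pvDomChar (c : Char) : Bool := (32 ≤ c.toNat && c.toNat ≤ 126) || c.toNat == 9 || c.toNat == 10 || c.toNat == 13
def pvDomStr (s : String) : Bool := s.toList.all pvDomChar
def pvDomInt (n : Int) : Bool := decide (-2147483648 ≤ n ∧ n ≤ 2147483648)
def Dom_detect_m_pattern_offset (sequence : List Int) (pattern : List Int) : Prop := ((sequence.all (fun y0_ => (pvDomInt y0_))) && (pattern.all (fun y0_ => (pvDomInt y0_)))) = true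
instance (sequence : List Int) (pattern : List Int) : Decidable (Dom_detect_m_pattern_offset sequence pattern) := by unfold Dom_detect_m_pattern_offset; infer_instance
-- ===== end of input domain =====

-- B replaces A's pop(0)-and-compare scan by a rolling-window-sum (Rabin–Karp style) filter:
-- the full window comparison runs only when the window sum equals the pattern sum. (objective: faster)

-- ===== PORT A =====
-- A's while loop: seq shrinks by pop(0) each iteration, value counts offsets.
def detectLoopA (pattern : List Int) (seq : List Int) (value : Int) : Int :=
  if h1 : pattern.length ≤ seq.length then
    if h2 : pattern = PySem.List.slice seq none (some (pattern.length : Int)) then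
      if value = 0 then value else 31 - value
    else detectLoopA pattern seq.tail (value + 1)
  else -1
termination_by seq.length
decreasing_by
  cases seq with
  | nil =>
      exfalso
      simp [PySem.List.slice] at h1 h2
      exact h2 h1
  | cons a t => simp

def detect_m_pattern_offset (sequence : List Int) (pattern : List Int) : Int :=
  -- seq = sequence[:] + sequence[:pattern_length]
  detectLoopA pattern
    (PySem.List.slice sequence none none ++
      PySem.List.slice sequence none (some (pattern.length : Int))) 0

-- ===== PORT B =====
-- B's for loop over i in range(n-m+1), carrying the rolling window sum th.
def detectLoopB (pattern text : List Int) (ph : Int) (n m : Nat) (i : Nat) (th : Int) : Int :=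
  if h : i ≤ n - m then
    if th = ph ∧ PySem.List.slice text (some (i : Int)) (some ((i : Int) + (m : Int))) = pattern then
      if i = 0 then (i : Int) else 31 - (i : Int)
    else
      detectLoopB pattern text ph n m (i + 1)
        (if i < n - m then th + text.getD (i + m) 0 - text.getD i 0 else th)
  else -1
termination_by n - m + 1 - i

def detect_m_pattern_offset_alt (sequence : List Int) (pattern : List Int) : Int :=
  let m := pattern.length
  if m = 0 then 0
  else
    let text := sequence ++ PySem.List.slice sequence none (some (m : Int))
    let n := text.length
    if m > n then -1
    else
      detectLoopB pattern text pattern.sum n m 0 (PySem.List.slice text none (some (m : Int))).sum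

-- ===== PRECONDITION & SPEC =====
def Spec_detect_m_pattern_offset (sequence : List Int) (pattern : List Int) (out : Int) : Prop := out = detect_m_pattern_offset_alt sequence pattern
instance (sequence : List Int) (pattern : List Int) (out : Int) : Decidable (Spec_detect_m_pattern_offset sequence pattern out) := by unfold Spec_detect_m_pattern_offset; infer_instance

-- ===== CLAIM (what is proved, stated in full; the proofs are below) =====
def Claim_equal_detect_m_pattern_offset : Prop := ∀ (sequence : List Int) (pattern : List Int), Dom_detect_m_pattern_offset sequence pattern → Spec_detect_m_pattern_offset sequence pattern (detect_m_pattern_offset sequence pattern)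

-- ===== LEMMAS AND PROOFS =====

theorem window_sum_roll (text : List Int) (m v : Nat) (hv : v + m < text.length) :
    ((text.drop (v + 1)).take m).sum
      = ((text.drop v).take m).sum + text.getD (v + m) 0 - text.getD v 0 := by
  cases m with
  | zero => simp
  | succ k =>
    have hv1 : v < text.length := by omega
    have h1 : text.drop v = text[v] :: text.drop (v + 1) := List.drop_eq_getElem_cons hv1
    have h3 : (text.drop (v + 1))[k]? = some text[v + (k + 1)] := by
      rw [List.getElem?_drop]
      rw [show v + 1 + k = v + (k + 1) from by omega]
      exact List.getElem?_eq_getElem (by omega)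
    rw [h1, List.take_succ_cons, List.take_add_one, h3,
        List.getD_eq_getElem text 0 (show v + (k + 1) < text.length from hv),
        List.getD_eq_getElem text 0 hv1]
    simp [List.sum_append]
    ring

theorem loop_eq (pattern text : List Int)
    (hm1 : 1 ≤ pattern.length) (hmn : pattern.length ≤ text.length) :
    ∀ v th, v ≤ text.length - pattern.length →
      th = ((text.drop v).take pattern.length).sum →
      detectLoopB pattern text pattern.sum text.length pattern.length v th
        = detectLoopA pattern (text.drop v) (v : Int) := by
  suffices h : ∀ d v th, text.length - pattern.length - v ≤ d →
      v ≤ text.length - pattern.length →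
      th = ((text.drop v).take pattern.length).sum →
      detectLoopB pattern text pattern.sum text.length pattern.length v th
        = detectLoopA pattern (text.drop v) (v : Int) by
    intro v th hv hth; exact h _ v th le_rfl hv hth
  intro d
  induction d with
  | zero =>
    intro v th hd hv hth
    have hveq : v = text.length - pattern.length := by omega
    rw [detectLoopB, dif_pos hv, detectLoopA,
        dif_pos (show pattern.length ≤ (text.drop v).length by simp only [List.length_drop]; omega)]
    rw [PySem.List.slice_natCast_add, PySem.List.slice_to_natCast]
    by_cases hw : pattern = (text.drop v).take pattern.length
    · rw [dif_pos hw, if_pos ⟨by rw [hth, ← hw], hw.symm⟩]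
      by_cases hv0 : v = 0 <;> simp [hv0]
    · rw [dif_neg hw, if_neg (by rintro ⟨-, h2⟩; exact hw h2.symm), List.tail_drop]
      rw [detectLoopB, dif_neg (by omega), detectLoopA,
          dif_neg (show ¬ pattern.length ≤ (text.drop (v + 1)).length by simp only [List.length_drop]; omega)]
  | succ k ih =>
    intro v th hd hv hth
    rw [detectLoopB, dif_pos hv, detectLoopA,
        dif_pos (show pattern.length ≤ (text.drop v).length by simp only [List.length_drop]; omega)]
    rw [PySem.List.slice_natCast_add, PySem.List.slice_to_natCast]
    by_cases hw : pattern = (text.drop v).take pattern.length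
    · rw [dif_pos hw, if_pos ⟨by rw [hth, ← hw], hw.symm⟩]
      by_cases hv0 : v = 0 <;> simp [hv0]
    · rw [dif_neg hw, if_neg (by rintro ⟨-, h2⟩; exact hw h2.symm), List.tail_drop]
      by_cases hlt : v < text.length - pattern.length
      · rw [if_pos hlt]
        rw [show ((v : Int) + 1) = ((v + 1 : Nat) : Int) from by push_cast; ring]
        exact ih (v + 1) _ (by omega) (by omega)
          (by rw [hth, window_sum_roll text pattern.length v (by omega)])
      · rw [if_neg hlt]
        rw [detectLoopB, dif_neg (by omega), detectLoopA,
            dif_neg (show ¬ pattern.length ≤ (text.drop (v + 1)).length by simp only [List.length_drop]; omega)]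

theorem detectLoopA_nil (seq : List Int) : detectLoopA [] seq 0 = 0 := by
  rw [detectLoopA, dif_pos (by simp),
      dif_pos (by rw [PySem.List.slice_to_natCast]; simp)]
  simp

-- ===== VERDICT (by name: the statement is the Claim_ definition above) =====
theorem detect_m_pattern_offset_spec : Claim_equal_detect_m_pattern_offset := by
  intro sequence pattern _
  unfold Spec_detect_m_pattern_offset detect_m_pattern_offset detect_m_pattern_offset_alt
  simp only [PySem.List.slice_none_none, PySem.List.slice_to_natCast]
  by_cases hm0 : pattern.length = 0
  · have hp : pattern = [] := List.eq_nil_of_length_eq_zero hm0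
    subst hp
    simp [detectLoopA_nil]
  · set text := sequence ++ sequence.take pattern.length with htext
    simp only [if_neg hm0]
    by_cases hmn : pattern.length > text.length
    · rw [if_pos hmn, detectLoopA, dif_neg (by omega)]
    · rw [if_neg hmn]
      have h := loop_eq pattern text (by omega) (by omega) 0
        ((text.take pattern.length).sum) (by omega) (by simp)
      simp only [List.drop_zero, Nat.cast_zero] at h
      exact h.symm
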